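-- pv_equiv track=rewrite | github.com/srna99/MeasEval | measeval.py | get_mismatched_metrics
-- ===== SOURCE A (Python) =====
-- def get_mismatched_metrics(actual, prediction):
--     """Get the metrics for the labels which were mismatched"""
--     mismatch = {
--             'O -> QNT': 0, 'O -> MSE': 0, 'O -> MSP': 0,
--             'QNT -> O': 0, 'MSE -> O': 0, 'MSP -> O': 0,
--             'QNT -> MSE': 0, 'QNT -> MSP': 0,
--             'MSE -> QNT': 0, 'MSE -> MSP': 0,
--             'MSP -> QNT': 0, 'MSP -> MSE': 0
--     }
--
--     labels = list(zip(actual, prediction))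
--
--     for act, pred in labels:
--         for idx in range(len(act)):
--             if act[idx] == 'O' and pred[idx] == 'QNT':
--                 mismatch['O -> QNT'] += 1
--             elif act[idx] == 'O' and pred[idx] == 'MSE':
--                 mismatch['O -> MSE'] += 1
--             elif act[idx] == 'O' and pred[idx] == 'MSP':
--                 mismatch['O -> MSP'] += 1
--             elif act[idx] == 'QNT' and pred[idx] == 'O':
--                 mismatch['QNT -> O'] += 1
--             elif act[idx] == 'MSE' and pred[idx] == 'O':
--                 mismatch['MSE -> O'] += 1
--             elif act[idx] == 'MSP' and pred[idx] == 'O':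
--                 mismatch['MSP -> O'] += 1
--             elif act[idx] == 'QNT' and pred[idx] == 'MSE':
--                 mismatch['QNT -> MSE'] += 1
--             elif act[idx] == 'QNT' and pred[idx] == 'MSP':
--                 mismatch['QNT -> MSP'] += 1
--             elif act[idx] == 'MSE' and pred[idx] == 'QNT':
--                 mismatch['MSE -> QNT'] += 1
--             elif act[idx] == 'MSE' and pred[idx] == 'MSP':
--                 mismatch['MSE -> MSP'] += 1
--             elif act[idx] == 'MSP' and pred[idx] == 'QNT':
--                 mismatch['MSP -> QNT'] += 1
--             elif act[idx] == 'MSP' and pred[idx] == 'MSE':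
--                 mismatch['MSP -> MSE'] += 1
--
--             idx += 1
--
--     return mismatch
-- ===== SOURCE B (Python) =====
-- def get_mismatched_metrics(actual, prediction):
--     """Get the metrics for the labels which were mismatched"""
--     relevant = ('O', 'QNT', 'MSE', 'MSP')
--     pairs = [(act[idx], pred[idx])
--              for act, pred in zip(actual, prediction)
--              for idx in range(len(act)) if act[idx] in relevant]
--     table = {
--             'O -> QNT': ('O', 'QNT'), 'O -> MSE': ('O', 'MSE'), 'O -> MSP': ('O', 'MSP'),
--             'QNT -> O': ('QNT', 'O'), 'MSE -> O': ('MSE', 'O'), 'MSP -> O': ('MSP', 'O'),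
--             'QNT -> MSE': ('QNT', 'MSE'), 'QNT -> MSP': ('QNT', 'MSP'),
--             'MSE -> QNT': ('MSE', 'QNT'), 'MSE -> MSP': ('MSE', 'MSP'),
--             'MSP -> QNT': ('MSP', 'QNT'), 'MSP -> MSE': ('MSP', 'MSE')
--     }
--     return {key: pairs.count(ap) for key, ap in table.items()}
-- ===== Notes on version B (the rewrite author's own statement) =====
-- stated objective: simpler
-- what changed: Replaces the 12-branch if/elif dispatch that increments a mutable counter dict with flattening the relevant (actual, predicted) label pairs into one list and projecting a fixed transition table through pairs.count.
import Mathlib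
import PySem

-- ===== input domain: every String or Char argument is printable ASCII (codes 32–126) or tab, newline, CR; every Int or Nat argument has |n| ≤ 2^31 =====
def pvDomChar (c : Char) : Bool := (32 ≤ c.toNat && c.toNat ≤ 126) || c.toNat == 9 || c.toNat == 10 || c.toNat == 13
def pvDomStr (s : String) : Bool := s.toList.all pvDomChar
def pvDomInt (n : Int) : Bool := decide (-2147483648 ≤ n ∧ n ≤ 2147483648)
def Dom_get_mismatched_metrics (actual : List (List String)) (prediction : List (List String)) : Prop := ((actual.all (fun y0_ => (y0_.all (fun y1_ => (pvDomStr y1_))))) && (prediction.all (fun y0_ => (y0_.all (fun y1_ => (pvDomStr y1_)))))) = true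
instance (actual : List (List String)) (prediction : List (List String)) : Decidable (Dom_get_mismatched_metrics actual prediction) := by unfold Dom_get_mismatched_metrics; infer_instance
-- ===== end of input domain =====

-- B replaces A's 12-branch if/elif dispatch by flattening the relevant (actual, predicted) label
-- pairs into one list and projecting a fixed transition table through pairs.count (objective: simpler).

-- ===== PORT A =====
-- A's loop body: the 12-branch if/elif chain updating the mismatch dict (mismatch[k] += 1 on an
-- always-present key is Dict.modify with default 0).
def pvStepA (d : PySem.Dict String Int) (a p : String) : PySem.Dict String Int :=
  if a = "O" ∧ p = "QNT" then d.modify "O -> QNT" 0 (· + 1)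
  else if a = "O" ∧ p = "MSE" then d.modify "O -> MSE" 0 (· + 1)
  else if a = "O" ∧ p = "MSP" then d.modify "O -> MSP" 0 (· + 1)
  else if a = "QNT" ∧ p = "O" then d.modify "QNT -> O" 0 (· + 1)
  else if a = "MSE" ∧ p = "O" then d.modify "MSE -> O" 0 (· + 1)
  else if a = "MSP" ∧ p = "O" then d.modify "MSP -> O" 0 (· + 1)
  else if a = "QNT" ∧ p = "MSE" then d.modify "QNT -> MSE" 0 (· + 1)
  else if a = "QNT" ∧ p = "MSP" then d.modify "QNT -> MSP" 0 (· + 1)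
  else if a = "MSE" ∧ p = "QNT" then d.modify "MSE -> QNT" 0 (· + 1)
  else if a = "MSE" ∧ p = "MSP" then d.modify "MSE -> MSP" 0 (· + 1)
  else if a = "MSP" ∧ p = "QNT" then d.modify "MSP -> QNT" 0 (· + 1)
  else if a = "MSP" ∧ p = "MSE" then d.modify "MSP -> MSE" 0 (· + 1)
  else d

def get_mismatched_metrics (actual : List (List String)) (prediction : List (List String)) : List (String × Int) :=
  let mismatch : PySem.Dict String Int := PySem.Dict.ofList
    [("O -> QNT", 0), ("O -> MSE", 0), ("O -> MSP", 0),
     ("QNT -> O", 0), ("MSE -> O", 0), ("MSP -> O", 0),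
     ("QNT -> MSE", 0), ("QNT -> MSP", 0),
     ("MSE -> QNT", 0), ("MSE -> MSP", 0),
     ("MSP -> QNT", 0), ("MSP -> MSE", 0)]
  let labels := List.zip actual prediction
  -- act[idx] / pred[idx]: pyGetD with dummy default; Pre_ keeps every evaluated index in range
  let final := labels.foldl (fun d ap =>
    (PySem.List.pyRange 0 (PySem.List.len ap.1) 1).foldl (fun d idx =>
      pvStepA d (PySem.List.pyGetD ap.1 idx "") (PySem.List.pyGetD ap.2 idx "")) d) mismatch
  final.items

-- ===== PORT B =====
def pvRelevant : List String := ["O", "QNT", "MSE", "MSP"]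

def pvTable : List (String × (String × String)) :=
  [("O -> QNT", ("O", "QNT")), ("O -> MSE", ("O", "MSE")), ("O -> MSP", ("O", "MSP")),
   ("QNT -> O", ("QNT", "O")), ("MSE -> O", ("MSE", "O")), ("MSP -> O", ("MSP", "O")),
   ("QNT -> MSE", ("QNT", "MSE")), ("QNT -> MSP", ("QNT", "MSP")),
   ("MSE -> QNT", ("MSE", "QNT")), ("MSE -> MSP", ("MSE", "MSP")),
   ("MSP -> QNT", ("MSP", "QNT")), ("MSP -> MSE", ("MSP", "MSE"))]

def get_mismatched_metrics_alt (actual : List (List String)) (prediction : List (List String)) : List (String × Int) :=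
  let pairs := (List.zip actual prediction).flatMap (fun ap =>
    ((PySem.List.pyRange 0 (PySem.List.len ap.1) 1).filter
        (fun idx => pvRelevant.contains (PySem.List.pyGetD ap.1 idx ""))).map
      (fun idx => (PySem.List.pyGetD ap.1 idx "", PySem.List.pyGetD ap.2 idx "")))
  pvTable.map (fun t => (t.1, (pairs.count t.2 : Int)))

-- ===== PRECONDITION & SPEC =====
-- Pre_ excludes exactly the inputs on which the Python A raises IndexError (pred[idx] evaluated for
-- an index idx < len(act) with act[idx] one of the four labels but idx ≥ len(pred)); B raises there too.
def Pre_get_mismatched_metrics (actual : List (List String)) (prediction : List (List String)) : Prop :=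
  ∀ ap ∈ List.zip actual prediction, ∀ idx < ap.1.length,
    ap.1[idx]! ∈ (["O", "QNT", "MSE", "MSP"] : List String) → idx < ap.2.length
instance (actual : List (List String)) (prediction : List (List String)) : Decidable (Pre_get_mismatched_metrics actual prediction) := by unfold Pre_get_mismatched_metrics; infer_instance

def pvWitness_get_mismatched_metrics : List (List String) × List (List String) :=
  ([["O", "QNT", "zz"], ["MSE"]], [["QNT", "QNT"], ["MSP", "O"]])

def Spec_get_mismatched_metrics (actual : List (List String)) (prediction : List (List String)) (out : List (String × Int)) : Prop := out = get_mismatched_metrics_alt actual prediction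
instance (actual : List (List String)) (prediction : List (List String)) (out : List (String × Int)) : Decidable (Spec_get_mismatched_metrics actual prediction out) := by unfold Spec_get_mismatched_metrics; infer_instance

-- ===== CLAIM (what is proved, stated in full; the proofs are below) =====
def Claim_equal_get_mismatched_metrics : Prop := ∀ (actual : List (List String)) (prediction : List (List String)), Dom_get_mismatched_metrics actual prediction → Pre_get_mismatched_metrics actual prediction → Spec_get_mismatched_metrics actual prediction (get_mismatched_metrics actual prediction)

-- ===== LEMMAS AND PROOFS =====

-- the dict state A's loop maintains: the 12 table keys, in order, with counts c
def pvState (c : String × String → Int) : PySem.Dict String Int :=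
  PySem.Dict.mk (pvTable.map (fun t => (t.1, c t.2)))

theorem pv_step (c : String × String → Int) (a p : String) :
    pvStepA (pvState c) a p = pvState (fun t => c t + if (a, p) = t then 1 else 0) := by
  by_cases ha1 : a = "O"
  · subst ha1
    by_cases hp1 : p = "QNT"
    · subst hp1
      simp [pvStepA, pvState, pvTable, PySem.Dict.modify, PySem.Dict.insert, PySem.Dict.get?, PySem.Dict.getD]
    by_cases hp2 : p = "MSE"
    · subst hp2
      simp [pvStepA, pvState, pvTable, PySem.Dict.modify, PySem.Dict.insert, PySem.Dict.get?, PySem.Dict.getD]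
    by_cases hp3 : p = "MSP"
    · subst hp3
      simp [pvStepA, pvState, pvTable, PySem.Dict.modify, PySem.Dict.insert, PySem.Dict.get?, PySem.Dict.getD]
    simp [pvStepA, pvState, pvTable, Prod.mk.injEq, hp1, hp2, hp3]
  by_cases ha2 : a = "QNT"
  · subst ha2
    by_cases hp1 : p = "O"
    · subst hp1
      simp [pvStepA, pvState, pvTable, PySem.Dict.modify, PySem.Dict.insert, PySem.Dict.get?, PySem.Dict.getD]
    by_cases hp2 : p = "MSE"
    · subst hp2
      simp [pvStepA, pvState, pvTable, PySem.Dict.modify, PySem.Dict.insert, PySem.Dict.get?, PySem.Dict.getD]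
    by_cases hp3 : p = "MSP"
    · subst hp3
      simp [pvStepA, pvState, pvTable, PySem.Dict.modify, PySem.Dict.insert, PySem.Dict.get?, PySem.Dict.getD]
    simp [pvStepA, pvState, pvTable, Prod.mk.injEq, hp1, hp2, hp3]
  by_cases ha3 : a = "MSE"
  · subst ha3
    by_cases hp1 : p = "O"
    · subst hp1
      simp [pvStepA, pvState, pvTable, PySem.Dict.modify, PySem.Dict.insert, PySem.Dict.get?, PySem.Dict.getD]
    by_cases hp2 : p = "QNT"
    · subst hp2
      simp [pvStepA, pvState, pvTable, PySem.Dict.modify, PySem.Dict.insert, PySem.Dict.get?, PySem.Dict.getD]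
    by_cases hp3 : p = "MSP"
    · subst hp3
      simp [pvStepA, pvState, pvTable, PySem.Dict.modify, PySem.Dict.insert, PySem.Dict.get?, PySem.Dict.getD]
    simp [pvStepA, pvState, pvTable, Prod.mk.injEq, hp1, hp2, hp3]
  by_cases ha4 : a = "MSP"
  · subst ha4
    by_cases hp1 : p = "O"
    · subst hp1
      simp [pvStepA, pvState, pvTable, PySem.Dict.modify, PySem.Dict.insert, PySem.Dict.get?, PySem.Dict.getD]
    by_cases hp2 : p = "QNT"
    · subst hp2
      simp [pvStepA, pvState, pvTable, PySem.Dict.modify, PySem.Dict.insert, PySem.Dict.get?, PySem.Dict.getD]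
    by_cases hp3 : p = "MSE"
    · subst hp3
      simp [pvStepA, pvState, pvTable, PySem.Dict.modify, PySem.Dict.insert, PySem.Dict.get?, PySem.Dict.getD]
    simp [pvStepA, pvState, pvTable, Prod.mk.injEq, hp1, hp2, hp3]
  simp [pvStepA, pvState, pvTable, Prod.mk.injEq, ha1, ha2, ha3, ha4]

theorem pv_fold (ps : List (String × String)) (c : String × String → Int) :
    ps.foldl (fun d x => pvStepA d x.1 x.2) (pvState c)
      = pvState (fun t => c t + (ps.count t : Int)) := by
  induction ps generalizing c with
  | nil => simp [pvState]
  | cons x ps ih =>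
    simp only [List.foldl_cons, pv_step, ih]
    congr 1
    funext t
    by_cases h : x = t
    · subst h
      simp
      ring
    · simp [h]

theorem pv_foldl_flatMap {α β γ : Type} (l : List α) (g : α → List β)
    (step : γ → β → γ) (init : γ) :
    l.foldl (fun d ap => (g ap).foldl step d) init = (l.flatMap g).foldl step init := by
  induction l generalizing init with
  | nil => rfl
  | cons x l ih => simp [List.flatMap_cons, List.foldl_append, ih]

theorem pv_count_block (a p : List String) (t : String × String) (ht : t.1 ∈ pvRelevant) :
    ((PySem.List.pyRange 0 (PySem.List.len a) 1).map
        (fun idx => (PySem.List.pyGetD a idx "", PySem.List.pyGetD p idx ""))).count t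
      = (((PySem.List.pyRange 0 (PySem.List.len a) 1).filter
            (fun idx => pvRelevant.contains (PySem.List.pyGetD a idx ""))).map
          (fun idx => (PySem.List.pyGetD a idx "", PySem.List.pyGetD p idx ""))).count t := by
  simp only [List.count, List.countP_map, List.countP_filter]
  apply List.countP_congr
  intro idx _
  by_cases h : (PySem.List.pyGetD a idx "", PySem.List.pyGetD p idx "") = t
  · have h1 : PySem.List.pyGetD a idx "" = t.1 := by rw [← h]
    simp [Function.comp, h1, ht]
  · simp [Function.comp, h]

theorem pv_count_lists (l : List (List String × List String)) (t : String × String)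
    (ht : t.1 ∈ pvRelevant) :
    (l.flatMap (fun ap => (PySem.List.pyRange 0 (PySem.List.len ap.1) 1).map
        (fun idx => (PySem.List.pyGetD ap.1 idx "", PySem.List.pyGetD ap.2 idx "")))).count t
      = (l.flatMap (fun ap => ((PySem.List.pyRange 0 (PySem.List.len ap.1) 1).filter
            (fun idx => pvRelevant.contains (PySem.List.pyGetD ap.1 idx ""))).map
          (fun idx => (PySem.List.pyGetD ap.1 idx "", PySem.List.pyGetD ap.2 idx "")))).count t := by
  induction l with
  | nil => rfl
  | cons ap l ih =>
    simp only [List.flatMap_cons, List.count_append, ih]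
    rw [pv_count_block ap.1 ap.2 t ht]

-- ===== VERDICT (by name: the statement is the Claim_ definition above) =====
theorem get_mismatched_metrics_spec : Claim_equal_get_mismatched_metrics := by
  intro actual prediction _ _
  unfold Spec_get_mismatched_metrics get_mismatched_metrics get_mismatched_metrics_alt
  dsimp only
  have hinit : PySem.Dict.ofList
      ([("O -> QNT", 0), ("O -> MSE", 0), ("O -> MSP", 0),
        ("QNT -> O", 0), ("MSE -> O", 0), ("MSP -> O", 0),
        ("QNT -> MSE", 0), ("QNT -> MSP", 0),
        ("MSE -> QNT", 0), ("MSE -> MSP", 0),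
        ("MSP -> QNT", 0), ("MSP -> MSE", 0)] : List (String × Int))
      = pvState (fun _ => 0) := by decide
  rw [hinit]
  have hflat :
      (List.zip actual prediction).foldl (fun d ap =>
        (PySem.List.pyRange 0 (PySem.List.len ap.1) 1).foldl (fun d idx =>
          pvStepA d (PySem.List.pyGetD ap.1 idx "") (PySem.List.pyGetD ap.2 idx "")) d)
        (pvState (fun _ => 0))
      = ((List.zip actual prediction).flatMap (fun ap =>
          (PySem.List.pyRange 0 (PySem.List.len ap.1) 1).map
            (fun idx => (PySem.List.pyGetD ap.1 idx "", PySem.List.pyGetD ap.2 idx "")))).foldl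
          (fun d x => pvStepA d x.1 x.2) (pvState (fun _ => 0)) := by
    rw [← pv_foldl_flatMap]
    congr 1
    funext d ap
    rw [List.foldl_map]
  rw [hflat, pv_fold]
  have hitems : ∀ c : String × String → Int,
      (pvState c).items = pvTable.map (fun t => (t.1, c t.2)) := fun _ => rfl
  rw [hitems]
  apply List.map_congr_left
  intro t ht
  have hrel : (t.2).1 ∈ pvRelevant := by fin_cases ht <;> decide
  rw [pv_count_lists _ t.2 hrel]
  simp
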